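-- pv_equiv track=rewrite | github.com/hajar-labs/document-processing | processors/structure_analyzer.py | _calculate_max_depth
-- ===== SOURCE A (Python) =====
-- from typing import Dict, List, Optional, Union, Any, Tuple
--
-- def _calculate_max_depth(hierarchy: Dict[str, List[str]]) -> int:
--     """Calculate maximum hierarchy depth."""
--     if not hierarchy:
--         return 1
--
--     def get_depth(node_id: str, current_depth: int = 1) -> int:
--         if node_id not in hierarchy or not hierarchy[node_id]:
--             return current_depth
--
--         max_child_depth = current_depth
--         for child_id in hierarchy[node_id]:
--             child_depth = get_depth(child_id, current_depth + 1)
--             max_child_depth = max(max_child_depth, child_depth)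
--
--         return max_child_depth
--
--     # Find root nodes (nodes that are not children of other nodes)
--     all_children = set()
--     for children in hierarchy.values():
--         all_children.update(children)
--
--     root_nodes = set(hierarchy.keys()) - all_children
--
--     if not root_nodes:
--         return 1
--
--     max_depth = 1
--     for root in root_nodes:
--         depth = get_depth(root)
--         max_depth = max(max_depth, depth)
--
--     return max_depth
-- ===== SOURCE B (Python) =====
-- def _calculate_max_depth(hierarchy):
--     """Calculate maximum hierarchy depth (memoized subtree heights: DP over the DAG,
--     each node's height is computed once and reused across shared children)."""
--     if not hierarchy:
--         return 1
--
--     all_children = set()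
--     for children in hierarchy.values():
--         all_children.update(children)
--
--     root_nodes = set(hierarchy.keys()) - all_children
--
--     if not root_nodes:
--         return 1
--
--     memo = {}
--
--     def height(node_id):
--         if node_id in memo:
--             return memo[node_id]
--         children = hierarchy.get(node_id)
--         h = 1
--         if children:
--             for child_id in children:
--                 h = max(h, 1 + height(child_id))
--         memo[node_id] = h
--         return h
--
--     max_depth = 1
--     for root in root_nodes:
--         max_depth = max(max_depth, height(root))
--
--     return max_depth
-- ===== Notes on version B (the rewrite author's own statement) =====
-- stated objective: alternative
-- what changed: A's un-memoized DFS re-explores every shared subtree from each root (worst-case exponential on DAGs with shared children); B computes each node's subtree height once with a memoized DFS (DP over the DAG) and takes the max over the roots.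
import Mathlib
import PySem

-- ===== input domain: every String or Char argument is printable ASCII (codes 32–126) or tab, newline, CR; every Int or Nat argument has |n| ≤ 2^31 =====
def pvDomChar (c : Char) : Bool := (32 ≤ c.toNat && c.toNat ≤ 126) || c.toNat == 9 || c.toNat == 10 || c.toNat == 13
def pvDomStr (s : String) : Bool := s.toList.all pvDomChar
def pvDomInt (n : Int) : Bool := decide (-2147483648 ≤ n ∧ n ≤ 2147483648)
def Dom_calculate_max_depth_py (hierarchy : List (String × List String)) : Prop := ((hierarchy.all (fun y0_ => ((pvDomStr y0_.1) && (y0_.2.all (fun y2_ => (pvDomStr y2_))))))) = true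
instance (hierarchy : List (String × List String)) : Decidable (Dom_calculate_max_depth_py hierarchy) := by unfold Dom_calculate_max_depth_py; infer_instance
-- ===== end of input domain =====

-- B replaces A's un-memoized DFS (which re-explores every shared subtree from scratch)
-- by a memoized DFS that computes each node's subtree height once; return values are
-- proved equal on Pre_ (the inputs where A's recursion terminates).

-- ===== PORT A =====
-- get_depth; the fuel argument only makes the recursion total in Lean (fuel 0 returns
-- current_depth, the value a leaf call returns); under Pre_ (no cycle reachable from a
-- root) fuel d.size + 1 is never exhausted before a leaf, so this is exact.
def pvAGet (d : PySem.Dict String (List String)) : Nat → String → Int → Int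
  | 0, _, currentDepth => currentDepth
  | fuel + 1, nodeId, currentDepth =>
    match d.get? nodeId with
    | none => currentDepth
    | some [] => currentDepth
    | some (c :: cs) =>
      (c :: cs).foldl (fun acc childId => max acc (pvAGet d fuel childId (currentDepth + 1)))
        currentDepth

def calculate_max_depth_py (hierarchy : List (String × List String)) : Int :=
  let d := PySem.Dict.ofList hierarchy
  if hierarchy.isEmpty then 1 else
    let allChildren := d.values.foldl (fun s children => PySem.Set.update s children) PySem.Set.empty
    let rootNodes := PySem.Set.diff (PySem.Set.ofList d.keys) allChildren
    if rootNodes.isEmpty then 1 else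
      rootNodes.foldl (fun maxDepth root => max maxDepth (pvAGet d (d.size + 1) root 1)) 1

-- ===== PORT B =====
-- height(node_id) with its memo dict threaded through; pvBGoChildren is the inner
-- 'for child_id in children' loop. The fuel argument only makes the recursion total in
-- Lean (Python's recursion, like A's, does not terminate on a cycle reachable from a
-- root; those inputs are outside Pre_); under Pre_ fuel d.size + 1 is never exhausted
-- at a node with children, and a childless node's value is 1 with or without fuel.
mutual
def pvBGo (d : PySem.Dict String (List String)) :
    Nat → String → PySem.Dict String Int → Int × PySem.Dict String Int
  | 0, _, memo => (1, memo)
  | fuel + 1, nodeId, memo =>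
    match memo.get? nodeId with
    | some h => (h, memo)
    | none =>
      match d.get? nodeId with
      | none => (1, memo.insert nodeId 1)
      | some [] => (1, memo.insert nodeId 1)
      | some (c :: cs) =>
        let r := pvBGoChildren d fuel (c :: cs) 1 memo
        (r.1, r.2.insert nodeId r.1)

def pvBGoChildren (d : PySem.Dict String (List String)) :
    Nat → List String → Int → PySem.Dict String Int → Int × PySem.Dict String Int
  | _, [], h, memo => (h, memo)
  | fuel, childId :: rest, h, memo =>
    let hc := pvBGo d fuel childId memo
    pvBGoChildren d fuel rest (max h (1 + hc.1)) hc.2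
end

def calculate_max_depth_py_alt (hierarchy : List (String × List String)) : Int :=
  let d := PySem.Dict.ofList hierarchy
  if hierarchy.isEmpty then 1 else
    let allChildren := d.values.foldl (fun s children => PySem.Set.update s children) PySem.Set.empty
    let rootNodes := PySem.Set.diff (PySem.Set.ofList d.keys) allChildren
    if rootNodes.isEmpty then 1 else
      (rootNodes.foldl (fun acc root =>
          let hr := pvBGo d (d.size + 1) root acc.2
          (max acc.1 hr.1, hr.2)) ((1 : Int), PySem.Dict.empty)).1

-- ===== PRECONDITION & SPEC =====
def pvSuccsOf (d : PySem.Dict String (List String)) (v : String) : List String :=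
  (d.get? v).getD []

def pvNextSet (d : PySem.Dict String (List String)) (s : List String) : List String :=
  PySem.Set.update s (s.flatMap (pvSuccsOf d))

def pvReachN (d : PySem.Dict String (List String)) : Nat → List String → List String
  | 0, s => s
  | k + 1, s => pvReachN d k (pvNextSet d s)

-- everything reachable from v in at least one step (L expansion rounds saturate)
def pvC (d : PySem.Dict String (List String)) (L : Nat) (v : String) : List String :=
  pvReachN d L (PySem.Set.ofList (pvSuccsOf d v))

-- Pre_ excludes exactly the inputs where some cycle of the hierarchy graph is reachable
-- from a root node: there Python A's unbounded recursion raises RecursionError.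
def Pre_calculate_max_depth_py (hierarchy : List (String × List String)) : Prop :=
  let d := PySem.Dict.ofList hierarchy
  let allChildren := d.values.foldl (fun s children => PySem.Set.update s children) PySem.Set.empty
  let rootNodes := PySem.Set.diff (PySem.Set.ofList d.keys) allChildren
  let nodes := PySem.Set.union (PySem.Set.ofList d.keys) allChildren
  ∀ v ∈ pvReachN d nodes.length rootNodes, v ∉ pvC d nodes.length v

instance (hierarchy : List (String × List String)) : Decidable (Pre_calculate_max_depth_py hierarchy) := by
  unfold Pre_calculate_max_depth_py; infer_instance

def pvWitness_calculate_max_depth_py : (List (String × List String)) :=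
  [("a", ["b", "c"]), ("b", ["c"]), ("c", [])]

def Spec_calculate_max_depth_py (hierarchy : List (String × List String)) (out : Int) : Prop := out = calculate_max_depth_py_alt hierarchy
instance (hierarchy : List (String × List String)) (out : Int) : Decidable (Spec_calculate_max_depth_py hierarchy out) := by unfold Spec_calculate_max_depth_py; infer_instance

-- ===== CLAIM (what is proved, stated in full; the proofs are below) =====
def Claim_equal_calculate_max_depth_py : Prop := ∀ (hierarchy : List (String × List String)), Dom_calculate_max_depth_py hierarchy → Pre_calculate_max_depth_py hierarchy → Spec_calculate_max_depth_py hierarchy (calculate_max_depth_py hierarchy)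

-- ===== LEMMAS AND PROOFS =====

-- the common recurrence both ports compute: pvG d f v = "height of v, cut off at f"
def pvG (d : PySem.Dict String (List String)) : Nat → String → Int
  | 0, _ => 1
  | f + 1, v =>
    match d.get? v with
    | some (c :: cs) => 1 + ((c :: cs).map (fun x => pvG d f x)).foldl max 0
    | _ => 1

-- v is a key with a nonempty child list (the only nodes the recursions descend from)
def pvKeyNE (d : PySem.Dict String (List String)) (v : String) : Bool :=
  match d.get? v with
  | some (_ :: _) => true
  | _ => false

-- #(key-with-children nodes in {v} ∪ closure v): the termination measure of the DFS
def pvM (d : PySem.Dict String (List String)) (nodesL : List String) (v : String) : Nat :=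
  (nodesL.filter (fun u => pvKeyNE d u && (u == v || (pvC d nodesL.length v).contains u))).length

-- ---- A-side: the naive DFS computes pvG ----

lemma pvA_fold (d : PySem.Dict String (List String)) (f : Nat)
    (ih : ∀ (v : String) (cur : Int), pvAGet d f v cur = cur - 1 + pvG d f v)
    (cs : List String) :
    ∀ (cur m : Int),
      cs.foldl (fun acc ch => max acc (pvAGet d f ch (cur + 1))) (cur + m) =
        cur + (cs.map (fun x => pvG d f x)).foldl max m := by
  induction cs with
  | nil => intro cur m; simp
  | cons c cs ihc =>
    intro cur m
    simp only [List.foldl_cons, List.map_cons]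
    rw [ih c (cur + 1),
      show max (cur + m) (cur + 1 - 1 + pvG d f c) = cur + max m (pvG d f c) by omega]
    exact ihc cur _

lemma pvAGet_eq (d : PySem.Dict String (List String)) :
    ∀ (f : Nat) (v : String) (cur : Int), pvAGet d f v cur = cur - 1 + pvG d f v := by
  intro f
  induction f with
  | zero => intro v cur; simp [pvAGet, pvG]
  | succ f ih =>
    intro v cur
    simp only [pvAGet, pvG]
    cases h : d.get? v with
    | none => dsimp only; omega
    | some l =>
      cases l with
      | nil => dsimp only; omega
      | cons c cs =>
        dsimp only
        have := pvA_fold d f ih (c :: cs) cur 0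
        rw [add_zero] at this
        rw [this]
        omega

-- ---- B-side arithmetic: the children loop computes 1 + (max of the children) ----

lemma pvB_fold_shift (d : PySem.Dict String (List String)) (N : Nat) (cs : List String) :
    ∀ (m : Int),
      cs.foldl (fun x c => max x (1 + pvG d N c)) (1 + m) =
        1 + (cs.map (fun x => pvG d N x)).foldl max m := by
  induction cs with
  | nil => intro m; simp
  | cons c cs ihc =>
    intro m
    simp only [List.foldl_cons, List.map_cons]
    rw [show max (1 + m) (1 + pvG d N c) = 1 + max m (pvG d N c) by omega]
    exact ihc _

-- ---- reachability closure (saturation of pvReachN) ----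

lemma pv_mem_pvNextSet (d : PySem.Dict String (List String)) (s : List String) (x : String) :
    x ∈ pvNextSet d s ↔ x ∈ s ∨ ∃ u ∈ s, x ∈ pvSuccsOf d u := by
  simp [pvNextSet, PySem.Set.mem_update, List.mem_flatMap]

lemma pv_reachN_subset_of_closed (d : PySem.Dict String (List String)) (T : List String)
    (hT : ∀ u ∈ T, ∀ x ∈ pvSuccsOf d u, x ∈ T) :
    ∀ (k : Nat) (s : List String), s ⊆ T → pvReachN d k s ⊆ T := by
  intro k
  induction k with
  | zero => intro s hs; simpa [pvReachN] using hs
  | succ k ih =>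
    intro s hs
    simp only [pvReachN]
    apply ih
    intro x hx
    rcases (pv_mem_pvNextSet d s x).1 hx with h | ⟨u, hu, hxu⟩
    · exact hs h
    · exact hT u (hs hu) x hxu

lemma pv_subset_reachN (d : PySem.Dict String (List String)) :
    ∀ (k : Nat) (s : List String), s ⊆ pvReachN d k s := by
  intro k
  induction k with
  | zero => intro s; simp [pvReachN, List.Subset.refl]
  | succ k ih =>
    intro s
    simp only [pvReachN]
    intro x hx
    exact ih (pvNextSet d s) ((pv_mem_pvNextSet d s x).2 (Or.inl hx))

lemma pv_reachN_of_fixed (d : PySem.Dict String (List String)) (s : List String)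
    (hfix : pvNextSet d s = s) : ∀ k, pvReachN d k s = s := by
  intro k
  induction k with
  | zero => rfl
  | succ k ih => simp only [pvReachN, hfix]; exact ih

lemma pv_prefix_update (xs : List String) :
    ∀ (s : PySem.Set String), s <+: PySem.Set.update s xs := by
  induction xs with
  | nil => intro s; simp [PySem.Set.update]
  | cons x xs ih =>
    intro s
    have h1 : s <+: PySem.Set.add s x := by
      simp only [PySem.Set.add]
      split
      · exact List.prefix_rfl
      · exact ⟨[x], rfl⟩
    have h2 := ih (PySem.Set.add s x)
    simp only [PySem.Set.update] at h2 ⊢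
    simpa only [List.foldl_cons] using h1.trans h2

lemma pv_nodup_subset_length (l₁ l₂ : List String) (h : l₁.Nodup) (hs : l₁ ⊆ l₂) :
    l₁.length ≤ l₂.length := by
  calc l₁.length = l₁.toFinset.card := (List.toFinset_card_of_nodup h).symm
  _ ≤ l₂.toFinset.card := Finset.card_le_card (by
      intro x hx; simp only [List.mem_toFinset] at *; exact hs hx)
  _ ≤ l₂.length := l₂.toFinset_card_le

lemma pv_next_subset (d : PySem.Dict String (List String)) (nodesL : List String)
    (hsucc : ∀ (u x : String), x ∈ pvSuccsOf d u → x ∈ nodesL)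
    (s : List String) (hs : s ⊆ nodesL) : pvNextSet d s ⊆ nodesL := by
  intro x hx
  rcases (pv_mem_pvNextSet d s x).1 hx with h | ⟨u, _, hxu⟩
  · exact hs h
  · exact hsucc u x hxu

lemma pv_saturate (d : PySem.Dict String (List String)) (nodesL : List String)
    (hsucc : ∀ (u x : String), x ∈ pvSuccsOf d u → x ∈ nodesL) :
    ∀ (L : Nat) (s : List String), s.Nodup → s ⊆ nodesL → nodesL.length ≤ s.length + L →
      pvNextSet d (pvReachN d L s) = pvReachN d L s := by
  intro L
  induction L with
  | zero =>
    intro s hnd hs hlen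
    show pvNextSet d (pvReachN d 0 s) = pvReachN d 0 s
    have hpre := pv_prefix_update (s.flatMap (pvSuccsOf d)) s
    have hnsub : pvNextSet d s ⊆ nodesL := pv_next_subset d nodesL hsucc s hs
    have hnnd : (pvNextSet d s).Nodup := PySem.Set.nodup_update _ _ hnd
    have hle : (pvNextSet d s).length ≤ s.length := by
      have := pv_nodup_subset_length _ _ hnnd hnsub
      omega
    exact (hpre.eq_of_length (le_antisymm hpre.length_le hle)).symm
  | succ L ih =>
    intro s hnd hs hlen
    by_cases hfix : pvNextSet d s = s
    · rw [pv_reachN_of_fixed d s hfix]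
      exact hfix
    · have hpre : s <+: pvNextSet d s := pv_prefix_update _ s
      have hlt : s.length < (pvNextSet d s).length := by
        rcases lt_or_eq_of_le hpre.length_le with h | h
        · exact h
        · exact absurd (hpre.eq_of_length h) (fun he => hfix he.symm)
      show pvNextSet d (pvReachN d L (pvNextSet d s)) = pvReachN d L (pvNextSet d s)
      exact ih (pvNextSet d s) (PySem.Set.nodup_update _ _ hnd)
        (pv_next_subset d nodesL hsucc s hs) (by omega)

lemma pv_reach_closed (d : PySem.Dict String (List String)) (nodesL : List String)
    (hsucc : ∀ (u x : String), x ∈ pvSuccsOf d u → x ∈ nodesL)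
    (s : List String) (hnd : s.Nodup) (hs : s ⊆ nodesL) :
    ∀ u ∈ pvReachN d nodesL.length s, ∀ x ∈ pvSuccsOf d u, x ∈ pvReachN d nodesL.length s := by
  intro u hu x hx
  have hsat := pv_saturate d nodesL hsucc nodesL.length s hnd hs (by omega)
  rw [← hsat]
  exact (pv_mem_pvNextSet d _ x).2 (Or.inr ⟨u, hu, hx⟩)

lemma pv_succ_mem_C (d : PySem.Dict String (List String)) (L : Nat) (v c : String)
    (hc : c ∈ pvSuccsOf d v) : c ∈ pvC d L v :=
  pv_subset_reachN d L _ ((PySem.Set.mem_ofList _ c).2 hc)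

lemma pv_C_closed (d : PySem.Dict String (List String)) (nodesL : List String)
    (hsucc : ∀ (u x : String), x ∈ pvSuccsOf d u → x ∈ nodesL) (v : String) :
    ∀ u ∈ pvC d nodesL.length v, ∀ x ∈ pvSuccsOf d u, x ∈ pvC d nodesL.length v := by
  apply pv_reach_closed d nodesL hsucc _ (PySem.Set.nodup_ofList _)
  intro x hx
  exact hsucc v x ((PySem.Set.mem_ofList _ x).1 hx)

lemma pv_C_subset (d : PySem.Dict String (List String)) (nodesL : List String)
    (hsucc : ∀ (u x : String), x ∈ pvSuccsOf d u → x ∈ nodesL)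
    (v c : String) (hc : c ∈ pvSuccsOf d v) :
    pvC d nodesL.length c ⊆ pvC d nodesL.length v := by
  apply pv_reachN_subset_of_closed d (pvC d nodesL.length v) (pv_C_closed d nodesL hsucc v)
  intro x hx
  exact pv_C_closed d nodesL hsucc v c (pv_succ_mem_C d _ v c hc) x
    ((PySem.Set.mem_ofList _ x).1 hx)

-- ---- the termination measure ----

lemma pv_pvM_pos (d : PySem.Dict String (List String)) (nodesL : List String) (v : String)
    (hv : v ∈ nodesL) (hk : pvKeyNE d v = true) : 1 ≤ pvM d nodesL v := by
  have hmem : v ∈ nodesL.filter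
      (fun u => pvKeyNE d u && (u == v || (pvC d nodesL.length v).contains u)) :=
    List.mem_filter.2 ⟨hv, by simp [hk]⟩
  have := List.length_pos_of_mem hmem
  unfold pvM
  omega

lemma pv_pvM_le_size (d : PySem.Dict String (List String)) (nodesL : List String)
    (hnodes : nodesL.Nodup) (v : String) : pvM d nodesL v ≤ d.size := by
  have hsub : (nodesL.filter
      (fun u => pvKeyNE d u && (u == v || (pvC d nodesL.length v).contains u))) ⊆ d.keys := by
    intro u hu
    have hpred := (List.mem_filter.1 hu).2
    have hk : pvKeyNE d u = true := by
      cases h : pvKeyNE d u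
      · rw [h] at hpred; simp at hpred
      · rfl
    unfold pvKeyNE at hk
    cases hg : d.get? u with
    | none => rw [hg] at hk; simp at hk
    | some l =>
      by_contra hmem
      have hnone := (PySem.Dict.get?_eq_none_iff_not_mem_keys d u).2 hmem
      rw [hnone] at hg
      simp at hg
  have hnd : (nodesL.filter
      (fun u => pvKeyNE d u && (u == v || (pvC d nodesL.length v).contains u))).Nodup :=
    List.Nodup.filter _ hnodes
  have hle := pv_nodup_subset_length _ _ hnd hsub
  have hkeys : d.keys.length = d.size := by
    simp [PySem.Dict.keys, PySem.Dict.size]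
  unfold pvM
  omega

lemma pv_countP_lt (l : List String) (hnd : l.Nodup) (p q : String → Bool)
    (himp : ∀ u, p u = true → q u = true) (v : String) (hv : v ∈ l)
    (hpv : p v = false) (hqv : q v = true) : l.countP p < l.countP q := by
  induction l with
  | nil => exact absurd hv (by simp)
  | cons x l ih =>
    simp only [List.countP_cons]
    by_cases hxv : x = v
    · subst hxv
      have hmono : l.countP p ≤ l.countP q := List.countP_mono_left (fun a _ => himp a)
      rw [hpv, hqv, if_neg (by simp), if_pos rfl]
      omega
    · have hv' : v ∈ l := by
        rcases List.mem_cons.1 hv with h | h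
        · exact absurd h.symm hxv
        · exact h
      have hlt := ih (List.Nodup.of_cons hnd) hv'
      have : (if p x then 1 else 0) ≤ (if q x then 1 else 0) := by
        by_cases hpx : p x = true
        · simp [hpx, himp x hpx]
        · simp only [Bool.not_eq_true] at hpx
          simp [hpx]
      omega

lemma pv_pvM_child_lt (d : PySem.Dict String (List String)) (nodesL : List String)
    (hnodes : nodesL.Nodup)
    (hsucc : ∀ (u x : String), x ∈ pvSuccsOf d u → x ∈ nodesL)
    (v c : String)
    (hvC : v ∉ pvC d nodesL.length v) (hcC : c ∉ pvC d nodesL.length c)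
    (hkv : pvKeyNE d v = true) (hc : c ∈ pvSuccsOf d v) (hvN : v ∈ nodesL) :
    pvM d nodesL c < pvM d nodesL v := by
  unfold pvM
  rw [← List.countP_eq_length_filter, ← List.countP_eq_length_filter]
  apply pv_countP_lt nodesL hnodes _ _ ?_ v hvN ?_ ?_
  · -- everything counted for c is counted for v
    intro u hu
    simp only [Bool.and_eq_true, Bool.or_eq_true, beq_iff_eq, List.contains_iff_mem] at hu ⊢
    refine ⟨hu.1, Or.inr ?_⟩
    rcases hu.2 with rfl | huC
    · exact pv_succ_mem_C d _ v u hc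
    · exact pv_C_subset d nodesL hsucc v c hc huC
  · -- v itself is not counted for c
    have hvc : v ≠ c := by
      rintro rfl
      exact hcC (pv_succ_mem_C d _ v v hc)
    have hvCc : v ∉ pvC d nodesL.length c := fun h =>
      hvC (pv_C_subset d nodesL hsucc v c hc h)
    simp [hvc, hvCc]
  · simp [hkv]

-- ---- stability of pvG on the acyclic reachable part ----

lemma pvG_leaf (d : PySem.Dict String (List String)) (v : String)
    (h : pvKeyNE d v = false) : ∀ f, pvG d f v = 1 := by
  intro f
  cases f with
  | zero => rfl
  | succ f =>
    simp only [pvG]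
    unfold pvKeyNE at h
    cases hg : d.get? v with
    | none => rfl
    | some l =>
      cases l with
      | nil => rfl
      | cons c cs => rw [hg] at h; simp at h

lemma pv_keyNE_some (d : PySem.Dict String (List String)) (v : String)
    (h : pvKeyNE d v = true) : ∃ c cs, d.get? v = some (c :: cs) := by
  unfold pvKeyNE at h
  cases hg : d.get? v with
  | none => rw [hg] at h; simp at h
  | some l =>
    cases l with
    | nil => rw [hg] at h; simp at h
    | cons c cs => exact ⟨c, cs, rfl⟩

lemma pv_succs_of_get? (d : PySem.Dict String (List String)) (v : String) {l : List String}
    (h : d.get? v = some l) : pvSuccsOf d v = l := by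
  simp [pvSuccsOf, h]

lemma pv_stable (d : PySem.Dict String (List String)) (nodesL : List String)
    (hnodes : nodesL.Nodup)
    (hsucc : ∀ (u x : String), x ∈ pvSuccsOf d u → x ∈ nodesL)
    (R : List String)
    (hRclosed : ∀ u ∈ R, ∀ x ∈ pvSuccsOf d u, x ∈ R)
    (hRnodes : R ⊆ nodesL)
    (hPre : ∀ u ∈ R, u ∉ pvC d nodesL.length u) :
    ∀ (f : Nat), ∀ v ∈ R, pvM d nodesL v ≤ f → pvG d f v = pvG d (pvM d nodesL v) v := by
  intro f
  induction f using Nat.strong_induction_on with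
  | _ f ih =>
    intro v hv hf
    rcases eq_or_lt_of_le hf with heq | hlt
    · rw [← heq]
    · by_cases hk : pvKeyNE d v = true
      · obtain ⟨c, cs, hg⟩ := pv_keyNE_some d v hk
        have hm1 : 1 ≤ pvM d nodesL v := pv_pvM_pos d nodesL v (hRnodes hv) hk
        obtain ⟨f', rfl⟩ : ∃ f', f = f' + 1 := ⟨f - 1, by omega⟩
        obtain ⟨m', hm'⟩ : ∃ m', pvM d nodesL v = m' + 1 := ⟨pvM d nodesL v - 1, by omega⟩
        rw [hm']
        simp only [pvG, hg]
        have hchild : ∀ x ∈ c :: cs, x ∈ R ∧ pvM d nodesL x < pvM d nodesL v := by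
          intro x hx
          have hxS : x ∈ pvSuccsOf d v := by rw [pv_succs_of_get? d v hg]; exact hx
          have hxR : x ∈ R := hRclosed v hv x hxS
          exact ⟨hxR, pv_pvM_child_lt d nodesL hnodes hsucc v x (hPre v hv) (hPre x hxR) hk hxS (hRnodes hv)⟩
        have hmap : ∀ (g : Nat), g < f' + 1 → pvM d nodesL v - 1 ≤ g →
            (c :: cs).map (fun x => pvG d g x) =
              (c :: cs).map (fun x => pvG d (pvM d nodesL x) x) := by
          intro g hg2 hg1
          apply List.map_congr_left
          intro x hx
          exact ih g hg2 x (hchild x hx).1 (by have := (hchild x hx).2; omega)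
        rw [hmap f' (by omega) (by omega), hmap m' (by omega) (by omega)]
      · simp only [Bool.not_eq_true] at hk
        rw [pvG_leaf d v hk, pvG_leaf d v hk]

lemma pv_stable_eq (d : PySem.Dict String (List String)) (nodesL : List String)
    (hnodes : nodesL.Nodup)
    (hsucc : ∀ (u x : String), x ∈ pvSuccsOf d u → x ∈ nodesL)
    (R : List String)
    (hRclosed : ∀ u ∈ R, ∀ x ∈ pvSuccsOf d u, x ∈ R)
    (hRnodes : R ⊆ nodesL)
    (hPre : ∀ u ∈ R, u ∉ pvC d nodesL.length u)
    (v : String) (hv : v ∈ R) (f₁ f₂ : Nat)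
    (h₁ : pvM d nodesL v ≤ f₁) (h₂ : pvM d nodesL v ≤ f₂) :
    pvG d f₁ v = pvG d f₂ v := by
  rw [pv_stable d nodesL hnodes hsucc R hRclosed hRnodes hPre f₁ v hv h₁,
    pv_stable d nodesL hnodes hsucc R hRclosed hRnodes hPre f₂ v hv h₂]

-- ---- the memoized DFS is correct ----

-- every memo entry is the final (stable) height of a reachable node
def pvGood (d : PySem.Dict String (List String)) (R : List String)
    (memo : PySem.Dict String Int) : Prop :=
  ∀ (k : String) (h : Int), memo.get? k = some h → k ∈ R ∧ h = pvG d (d.size + 1) k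

lemma pvGood_insert (d : PySem.Dict String (List String)) (R : List String)
    (memo : PySem.Dict String Int) (hg : pvGood d R memo) (v : String)
    (hv : v ∈ R) (x : Int) (hx : x = pvG d (d.size + 1) v) :
    pvGood d R (memo.insert v x) := by
  intro k h hk
  rw [PySem.Dict.get?_insert] at hk
  split at hk
  · rename_i hkv
    subst hkv
    exact ⟨hv, by injection hk with h'; rw [← h', hx]⟩
  · exact hg k h hk

lemma pvBGoChildren_spec (d : PySem.Dict String (List String)) (nodesL R : List String)
    (f : Nat)
    (ihf : ∀ (v : String) (memo : PySem.Dict String Int), v ∈ R → pvM d nodesL v ≤ f →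
      pvGood d R memo →
      (pvBGo d f v memo).1 = pvG d (d.size + 1) v ∧ pvGood d R (pvBGo d f v memo).2) :
    ∀ (l : List String), (∀ c ∈ l, c ∈ R ∧ pvM d nodesL c ≤ f) →
      ∀ (a : Int) (memo : PySem.Dict String Int), pvGood d R memo →
        (pvBGoChildren d f l a memo).1 =
          l.foldl (fun x c => max x (1 + pvG d (d.size + 1) c)) a ∧
        pvGood d R (pvBGoChildren d f l a memo).2 := by
  intro l
  induction l with
  | nil => intro _ a memo hg; simp only [pvBGoChildren]; exact ⟨rfl, hg⟩
  | cons c l ihl =>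
    intro hl a memo hg
    simp only [pvBGoChildren, List.foldl_cons]
    have h1 := ihf c memo (hl c (by simp)).1 (hl c (by simp)).2 hg
    rw [h1.1]
    exact ihl (fun x hx => hl x (by simp [hx])) _ _ h1.2

lemma pvBGo_spec (d : PySem.Dict String (List String)) (nodesL : List String)
    (hnodes : nodesL.Nodup)
    (hsucc : ∀ (u x : String), x ∈ pvSuccsOf d u → x ∈ nodesL)
    (R : List String)
    (hRclosed : ∀ u ∈ R, ∀ x ∈ pvSuccsOf d u, x ∈ R)
    (hRnodes : R ⊆ nodesL)
    (hPre : ∀ u ∈ R, u ∉ pvC d nodesL.length u) :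
    ∀ (f : Nat) (v : String) (memo : PySem.Dict String Int), v ∈ R → pvM d nodesL v ≤ f →
      pvGood d R memo →
      (pvBGo d f v memo).1 = pvG d (d.size + 1) v ∧ pvGood d R (pvBGo d f v memo).2 := by
  intro f
  induction f with
  | zero =>
    intro v memo hv hm hg
    have hk : pvKeyNE d v = false := by
      cases hkk : pvKeyNE d v
      · rfl
      · have := pv_pvM_pos d nodesL v (hRnodes hv) hkk; omega
    simp only [pvBGo]
    exact ⟨(pvG_leaf d v hk _).symm, hg⟩
  | succ f ihf =>
    intro v memo hv hm hg
    simp only [pvBGo]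
    cases hmv : memo.get? v with
    | some h =>
      dsimp only
      exact ⟨(hg v h hmv).2, hg⟩
    | none =>
      cases hgv : d.get? v with
      | none =>
        dsimp only
        have hk : pvKeyNE d v = false := by unfold pvKeyNE; rw [hgv]
        exact ⟨(pvG_leaf d v hk _).symm,
          pvGood_insert d R memo hg v hv 1 (pvG_leaf d v hk _).symm⟩
      | some l =>
        cases l with
        | nil =>
          dsimp only
          have hk : pvKeyNE d v = false := by unfold pvKeyNE; rw [hgv]
          exact ⟨(pvG_leaf d v hk _).symm,
            pvGood_insert d R memo hg v hv 1 (pvG_leaf d v hk _).symm⟩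
        | cons c cs =>
          dsimp only
          have hk : pvKeyNE d v = true := by unfold pvKeyNE; rw [hgv]
          have hchild : ∀ x ∈ c :: cs, x ∈ R ∧ pvM d nodesL x ≤ f := by
            intro x hx
            have hxS : x ∈ pvSuccsOf d v := by rw [pv_succs_of_get? d v hgv]; exact hx
            have hxR : x ∈ R := hRclosed v hv x hxS
            have hlt := pv_pvM_child_lt d nodesL hnodes hsucc v x (hPre v hv)
              (hPre x hxR) hk hxS (hRnodes hv)
            exact ⟨hxR, by omega⟩
          have hrec := pvBGoChildren_spec d nodesL R f ihf (c :: cs) hchild 1 memo hg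
          have hval : (pvBGoChildren d f (c :: cs) 1 memo).1 = pvG d (d.size + 1) v := by
            rw [hrec.1]
            have hshift := pvB_fold_shift d (d.size + 1) (c :: cs) 0
            rw [add_zero] at hshift
            rw [hshift]
            have hRHS : pvG d (d.size + 1) v =
                1 + ((c :: cs).map (fun x => pvG d d.size x)).foldl max 0 := by
              simp only [pvG, hgv]
            rw [hRHS]
            congr 2
            apply List.map_congr_left
            intro x hx
            have hxS : x ∈ pvSuccsOf d v := by rw [pv_succs_of_get? d v hgv]; exact hx
            have hxR : x ∈ R := hRclosed v hv x hxS
            have hms := pv_pvM_le_size d nodesL hnodes x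
            exact pv_stable_eq d nodesL hnodes hsucc R hRclosed hRnodes hPre x hxR
              (d.size + 1) d.size (by omega) (by omega)
          exact ⟨hval, pvGood_insert d R _ hrec.2 v hv _ hval⟩

lemma pvBRoots_spec (d : PySem.Dict String (List String)) (nodesL : List String)
    (hnodes : nodesL.Nodup)
    (hsucc : ∀ (u x : String), x ∈ pvSuccsOf d u → x ∈ nodesL)
    (R : List String)
    (hRclosed : ∀ u ∈ R, ∀ x ∈ pvSuccsOf d u, x ∈ R)
    (hRnodes : R ⊆ nodesL)
    (hPre : ∀ u ∈ R, u ∉ pvC d nodesL.length u) :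
    ∀ (l : List String), (∀ r ∈ l, r ∈ R) →
      ∀ (a : Int) (memo : PySem.Dict String Int), pvGood d R memo →
        (l.foldl (fun acc root =>
            let hr := pvBGo d (d.size + 1) root acc.2
            (max acc.1 hr.1, hr.2)) (a, memo)).1 =
          l.foldl (fun acc root => max acc (pvG d (d.size + 1) root)) a := by
  intro l
  induction l with
  | nil => intro _ a memo _; rfl
  | cons r l ihl =>
    intro hl a memo hg
    simp only [List.foldl_cons]
    have hms := pv_pvM_le_size d nodesL hnodes r
    have h1 := pvBGo_spec d nodesL hnodes hsucc R hRclosed hRnodes hPre (d.size + 1) r memo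
      (hl r (by simp)) (by omega) hg
    rw [h1.1]
    exact ihl (fun x hx => hl x (by simp [hx])) _ _ h1.2

-- ---- membership helpers for the sets the ports build ----

lemma pv_mem_foldl_update (vals : List (List String)) :
    ∀ (s : PySem.Set String) (x : String),
      x ∈ s → x ∈ vals.foldl (fun s cs => PySem.Set.update s cs) s := by
  induction vals with
  | nil => intro s x hx; simpa using hx
  | cons l vals ih =>
    intro s x hx
    exact ih _ x ((PySem.Set.mem_update s l x).2 (Or.inl hx))

lemma pv_mem_allChildren (vals : List (List String)) :
    ∀ (s : PySem.Set String) (l : List String) (c : String),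
      l ∈ vals → c ∈ l → c ∈ vals.foldl (fun s cs => PySem.Set.update s cs) s := by
  induction vals with
  | nil => intro s l c h; exact absurd h (by simp)
  | cons l0 vals ih =>
    intro s l c hl hc
    rcases List.mem_cons.1 hl with rfl | hl
    · exact pv_mem_foldl_update vals _ c ((PySem.Set.mem_update s l c).2 (Or.inr hc))
    · exact ih _ l c hl hc

-- ===== VERDICT (by name: the statement is the Claim_ definition above) =====
theorem calculate_max_depth_py_spec : Claim_equal_calculate_max_depth_py := by
  intro hierarchy _ hpre
  unfold Spec_calculate_max_depth_py calculate_max_depth_py calculate_max_depth_py_alt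
  simp only [Pre_calculate_max_depth_py] at hpre
  cases hE : hierarchy.isEmpty
  · simp only [Bool.false_eq_true, if_false]
    set d := PySem.Dict.ofList hierarchy with hd
    set allChildren := d.values.foldl (fun s children => PySem.Set.update s children) PySem.Set.empty with hAC
    set rootNodes := PySem.Set.diff (PySem.Set.ofList d.keys) allChildren with hR
    set nodesL := PySem.Set.union (PySem.Set.ofList d.keys) allChildren with hN
    set R := pvReachN d nodesL.length rootNodes with hRR
    have hsucc : ∀ (u x : String), x ∈ pvSuccsOf d u → x ∈ nodesL := by
      intro u x hx
      unfold pvSuccsOf at hx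
      cases hg : d.get? u with
      | none => rw [hg] at hx; simp at hx
      | some l =>
        rw [hg] at hx
        simp only [Option.getD_some] at hx
        have hlv : l ∈ d.values := by
          have := PySem.Dict.mem_items_of_get?_eq_some d hg
          simp only [PySem.Dict.values]
          exact List.mem_map_of_mem this
        have : x ∈ allChildren := pv_mem_allChildren d.values PySem.Set.empty l x hlv hx
        exact (PySem.Set.mem_union _ _ x).2 (Or.inr this)
    have hnodesnd : nodesL.Nodup := PySem.Set.nodup_union _ _ (PySem.Set.nodup_ofList _)
    have hrootsnd : rootNodes.Nodup := PySem.Set.nodup_diff _ _ (PySem.Set.nodup_ofList _)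
    have hrootsN : rootNodes ⊆ nodesL := by
      intro x hx
      have := (PySem.Set.mem_diff _ _ x).1 (hR ▸ hx)
      exact (PySem.Set.mem_union _ _ x).2 (Or.inl this.1)
    have hRclosed : ∀ u ∈ R, ∀ x ∈ pvSuccsOf d u, x ∈ R :=
      pv_reach_closed d nodesL hsucc rootNodes hrootsnd hrootsN
    have hRnodes : R ⊆ nodesL :=
      pv_reachN_subset_of_closed d nodesL (fun u _ x hx => hsucc u x hx)
        nodesL.length rootNodes hrootsN
    have hPre' : ∀ u ∈ R, u ∉ pvC d nodesL.length u := hpre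
    cases hRn : rootNodes.isEmpty
    · simp only [Bool.false_eq_true, if_false]
      have hB := pvBRoots_spec d nodesL hnodesnd hsucc R hRclosed hRnodes hPre'
        rootNodes (fun r hr => pv_subset_reachN d nodesL.length rootNodes hr) 1
        PySem.Dict.empty
        (fun k h hk => by rw [PySem.Dict.get?_empty] at hk; cases hk)
      rw [hB]
      have hA : (fun (m : Int) (root : String) => max m (pvAGet d (d.size + 1) root 1)) =
          (fun (m : Int) (root : String) => max m (pvG d (d.size + 1) root)) := by
        funext m root
        rw [pvAGet_eq]
        omega
      rw [hA]
    · simp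
  · simp
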